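-- pv_equiv track=rewrite | github.com/pypi-data/pypi-mirror-131 | packages/nvdsw/nvdsw-0.0.395-py3-none-any.whl/nvdsw/setup.py | slz
-- ===== SOURCE A (Python) =====
-- def slz(ver_str):
--
--     nl = []
--     l = ver_str.split(".")
--     for s in l:
--         while s.startswith("0") and len(s) > 1:
--             s = s[1:]
--         nl.append(s)
--     return ".".join(nl)
-- ===== SOURCE B (Python) =====
-- def slz(ver_str):
--     # single left-to-right scan; no split/join of segments
--     out = []
--     at_start = True
--     n = len(ver_str)
--     for i, c in enumerate(ver_str):
--         if c == '.':
--             out.append(c)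
--             at_start = True
--         elif at_start and c == '0' and i + 1 < n and ver_str[i + 1] != '.':
--             pass  # drop a leading zero (a non-final char of its segment)
--         else:
--             out.append(c)
--             at_start = False
--     return ''.join(out)
-- ===== Notes on version B (the rewrite author's own statement) =====
-- stated objective: alternative
-- what changed: Replaces split-on-dot + a per-segment zero-stripping while-loop + join with a single left-to-right character scan that drops a zero digit exactly when it starts a segment and is not that segment's last character, never materialising the list of segments.
import Mathlib
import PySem

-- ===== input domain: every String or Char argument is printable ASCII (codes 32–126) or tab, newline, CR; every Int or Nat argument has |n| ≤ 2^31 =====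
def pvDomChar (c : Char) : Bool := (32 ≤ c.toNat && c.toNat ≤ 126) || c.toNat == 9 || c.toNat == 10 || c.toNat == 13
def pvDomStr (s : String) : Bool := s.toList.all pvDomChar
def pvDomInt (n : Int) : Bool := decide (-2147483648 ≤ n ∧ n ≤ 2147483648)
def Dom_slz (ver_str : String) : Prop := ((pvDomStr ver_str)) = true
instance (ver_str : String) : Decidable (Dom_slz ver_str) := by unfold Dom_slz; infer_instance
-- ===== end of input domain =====

-- B replaces A's split / per-segment strip loop / join with one left-to-right scan of the characters (objective: alternative).

-- ===== PORT A =====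
-- while s.startswith("0") and len(s) > 1: s = s[1:]
-- (on a nonempty s, s.startswith("0") ↔ head = '0'; len(s) > 1 ↔ tail ≠ []; s[1:] = tail; exact)
def slzStripA : List Char → List Char
  | [] => []
  | c :: rest => if c = '0' ∧ rest ≠ [] then slzStripA rest else c :: rest

def slz (ver_str : String) : String :=
  let l := PySem.Chars.splitOn ver_str.toList ['.']
  let nl := l.foldl (fun nl s => nl ++ [slzStripA s]) []
  String.mk (PySem.Chars.join ['.'] nl)

-- ===== PORT B =====
-- the for-loop of Source B with its `at_start` flag; the lookahead ver_str[i+1] (exists and ≠ '.')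
-- is the head of the remaining character list (exact)
def slzScan (atStart : Bool) : List Char → List Char
  | [] => []
  | c :: rest =>
    if c = '.' then '.' :: slzScan true rest
    else if atStart && (c == '0') && (match rest with | [] => false | d :: _ => d != '.') then
      slzScan true rest
    else c :: slzScan false rest

def slz_alt (ver_str : String) : String := String.mk (slzScan true ver_str.toList)

-- ===== PRECONDITION & SPEC =====
def Spec_slz (ver_str : String) (out : String) : Prop := out = slz_alt ver_str
instance (ver_str : String) (out : String) : Decidable (Spec_slz ver_str out) := by unfold Spec_slz; infer_instance

-- ===== CLAIM (what is proved, stated in full; the proofs are below) =====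
def Claim_equal_slz : Prop := ∀ (ver_str : String), Dom_slz ver_str → Spec_slz ver_str (slz ver_str)

-- ===== LEMMAS AND PROOFS =====

-- structural characterisation of splitOn on the single-char separator '.'
def mySplit : List Char → List (List Char)
  | [] => [[]]
  | c :: rest =>
    if c = '.' then [] :: mySplit rest
    else match mySplit rest with
      | [] => [[c]]
      | p :: ps => (c :: p) :: ps

theorem mySplit_ne_nil (cs : List Char) : mySplit cs ≠ [] := by
  cases cs with
  | nil => simp [mySplit]
  | cons c rest =>
    simp only [mySplit]
    split
    · simp
    · cases h : mySplit rest <;> simp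

theorem splitOn_go_eq (fuel : Nat) (l cur : List Char) (acc : List (List Char))
    (h : l.length < fuel) :
    PySem.Chars.splitOn.go ['.'] fuel l cur acc
      = acc.reverse ++ (mySplit l).modifyHead (fun p => cur.reverse ++ p) := by
  induction fuel generalizing l cur acc with
  | zero => omega
  | succ fuel ih =>
    cases l with
    | nil => simp [PySem.Chars.splitOn.go, mySplit]
    | cons c rest =>
      by_cases hc : c = '.'
      · subst hc
        rw [show PySem.Chars.splitOn.go ['.'] (fuel+1) ('.' :: rest) cur acc
              = PySem.Chars.splitOn.go ['.'] fuel rest [] (cur.reverse :: acc) from by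
          simp [PySem.Chars.splitOn.go, List.isPrefixOf]]
        rw [ih rest [] (cur.reverse :: acc) (by simpa using Nat.lt_of_succ_lt_succ h)]
        cases hms : mySplit rest with
        | nil => exact absurd hms (mySplit_ne_nil rest)
        | cons p ps => simp [mySplit, hms]
      · rw [show PySem.Chars.splitOn.go ['.'] (fuel+1) (c :: rest) cur acc
              = PySem.Chars.splitOn.go ['.'] fuel rest (c :: cur) acc from by
          simp [PySem.Chars.splitOn.go, List.isPrefixOf]
          exact fun h => absurd h.symm hc]
        rw [ih rest (c :: cur) acc (by simpa using Nat.lt_of_succ_lt_succ h)]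
        cases hms : mySplit rest with
        | nil => exact absurd hms (mySplit_ne_nil rest)
        | cons p ps => simp [mySplit, hc, hms]

theorem splitOn_eq_mySplit (cs : List Char) :
    PySem.Chars.splitOn cs ['.'] = mySplit cs := by
  rw [PySem.Chars.splitOn, splitOn_go_eq (cs.length + 1) cs [] [] (by omega)]
  cases h : mySplit cs with
  | nil => exact absurd h (mySplit_ne_nil cs)
  | cons p ps => simp

theorem foldl_append_map {α β : Type} (f : α → β) (l : List α) (acc : List β) :
    l.foldl (fun nl s => nl ++ [f s]) acc = acc ++ l.map f := by
  induction l generalizing acc with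
  | nil => simp
  | cons x xs ih => simp [ih]

theorem join_cons_head (c : Char) (p : List Char) (ps : List (List Char)) :
    PySem.Chars.join ['.'] ((c :: p) :: ps) = c :: PySem.Chars.join ['.'] (p :: ps) := by
  cases ps <;> simp [PySem.Chars.join, List.intercalate, List.intersperse]

theorem join_nil_head (ps : List (List Char)) (h : ps ≠ []) :
    PySem.Chars.join ['.'] ([] :: ps) = '.' :: PySem.Chars.join ['.'] ps := by
  cases ps with
  | nil => exact absurd rfl h
  | cons q qs => cases qs <;> simp [PySem.Chars.join, List.intercalate, List.intersperse]

def mapTail {α : Type} (f : α → α) : List α → List α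
  | [] => []
  | x :: xs => x :: xs.map f

theorem scan_eq_join (cs : List Char) :
    slzScan true cs = PySem.Chars.join ['.'] ((mySplit cs).map slzStripA)
    ∧ slzScan false cs = PySem.Chars.join ['.'] (mapTail slzStripA (mySplit cs)) := by
  induction cs with
  | nil =>
    simp [slzScan, mySplit, mapTail, slzStripA, PySem.Chars.join,
      List.intercalate, List.intersperse]
  | cons c rest ih =>
    obtain ⟨iht, ihf⟩ := ih
    by_cases hc : c = '.'
    · subst hc
      have hne : (mySplit rest).map slzStripA ≠ [] := by
        cases h : mySplit rest
        · exact absurd h (mySplit_ne_nil rest)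
        · simp [h]
      constructor <;>
        simp [slzScan, mySplit, mapTail, slzStripA, iht, join_nil_head _ hne]
    · cases hms : mySplit rest with
      | nil => exact absurd hms (mySplit_ne_nil rest)
      | cons p ps =>
        have hsplit : mySplit (c :: rest) = (c :: p) :: ps := by
          simp [mySplit, hc, hms]
        have hfalse : slzScan false (c :: rest)
            = PySem.Chars.join ['.'] (mapTail slzStripA (mySplit (c :: rest))) := by
          have hstep : slzScan false (c :: rest) = c :: slzScan false rest := by
            simp [slzScan, hc]
          rw [hstep, ihf, hsplit, hms]
          simp [mapTail, join_cons_head]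
        refine ⟨?_, hfalse⟩
        cases rest with
        | nil =>
          have hms' := hms
          simp only [mySplit, List.cons.injEq] at hms'
          rw [hsplit, ← hms'.1, ← hms'.2]
          simp [slzScan, slzStripA, hc, PySem.Chars.join, List.intercalate, List.intersperse]
        | cons d r =>
          by_cases hcond : ((c == '0') && (d != '.')) = true
          · have hc0 : c = '0' := by
              rw [Bool.and_eq_true] at hcond; exact beq_iff_eq.mp hcond.1
            have hd : d ≠ '.' := by
              rw [Bool.and_eq_true] at hcond; simpa using hcond.2
            have hp : p ≠ [] := by
              have hms' := hms
              simp only [mySplit, if_neg hd] at hms'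
              cases h2 : mySplit r with
              | nil => exact absurd h2 (mySplit_ne_nil r)
              | cons q qs =>
                rw [h2] at hms'
                simp only [List.cons.injEq] at hms'
                rw [← hms'.1]
                simp
            have hstep : slzScan true (c :: d :: r) = slzScan true (d :: r) := by
              simp [slzScan, hc, hc0, hd]
            rw [hstep, iht, hsplit, hms]
            have hstrip : slzStripA (c :: p) = slzStripA p := by
              subst hc0; simp [slzStripA, hp]
            simp [hstrip]
          · have hcf : ((c == '0') && (d != '.')) = false := by
              simpa using hcond
            have hstep : slzScan true (c :: d :: r) = c :: slzScan false (d :: r) := by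
              simp [slzScan, hc, hcf]
            have hstrip : slzStripA (c :: p) = c :: p := by
              by_cases hc0 : c = '0'
              · have hd : d = '.' := by
                  by_contra hd
                  exact hcond (by simp [hc0, hd])
                have hp : p = [] := by
                  subst hd
                  have hms' := hms
                  simp only [mySplit, if_pos trivial, List.cons.injEq] at hms'
                  exact hms'.1.symm
                subst hp; simp [slzStripA]
              · simp [slzStripA, hc0]
            rw [hstep, ihf, hsplit, hms]
            simp [mapTail, hstrip, join_cons_head]

-- ===== VERDICT (by name: the statement is the Claim_ definition above) =====
theorem slz_spec : Claim_equal_slz := by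
  intro ver_str _
  unfold Spec_slz
  simp only [slz, slz_alt, splitOn_eq_mySplit, foldl_append_map, List.nil_append]
  rw [(scan_eq_join ver_str.toList).1]
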